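-- pv_equiv track=rewrite | github.com/streettunedai/streettuned-logcheck-api | app/analyzers/cummins.py | required_channels_for_platform
-- ===== SOURCE A (Python) =====
-- from typing import Any, Dict, List, Optional, Tuple
--
-- COMMON_REQUIRED = ["engine_rpm", "egt"]
--
-- def required_channels_for_platform(platform: str, matched: Dict[str, str]) -> List[str]:
--     missing: List[str] = []
--     for req in COMMON_REQUIRED:
--         if req not in matched:
--             missing.append(req)
--
--     if "boost_psi" not in matched and "map_kpa" not in matched:
--         missing.append("boost_psi_or_map_kpa")
--
--     if platform in {"cummins_12v_ve", "cummins_12v_ppump"}: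
--         return missing
--     if platform == "cummins_24v_vp44":
--         if "fuel_pressure" not in matched:
--             missing.append("fuel_pressure")
--         return missing
--     if platform == "cummins_5_9_common_rail":
--         if "rail_pressure_commanded" not in matched:
--             missing.append("rail_pressure_commanded")
--         if "rail_pressure_actual" not in matched:
--             missing.append("rail_pressure_actual")
--         return missing
--     return missing
-- ===== SOURCE B (Python) =====
-- from typing import Dict, List
--
-- COMMON_REQUIRED = ["engine_rpm", "egt"]
--
-- PLATFORM_EXTRAS = {
--     "cummins_24v_vp44": ["fuel_pressure"],
--     "cummins_5_9_common_rail": ["rail_pressure_commanded", "rail_pressure_actual"],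
-- }
--
-- def required_channels_for_platform(platform: str, matched: Dict[str, str]) -> List[str]:
--     # one requirements table: each entry is a list of alternative keys
--     reqs = [["engine_rpm"], ["egt"], ["boost_psi", "map_kpa"]]
--     reqs += [[c] for c in PLATFORM_EXTRAS.get(platform, [])]
--     missing: List[str] = []
--     for alts in reqs:
--         if not any(k in matched for k in alts):
--             missing.append("boost_psi_or_map_kpa" if len(alts) > 1 else alts[0])
--     return missing
-- ===== Notes on version B (the rewrite author's own statement) =====
-- stated objective: idiomatic
-- what changed: Replaces A's hard-coded branch chain (common loop, boost/map if, per-platform if/return ladder) by a single declarative requirements table (alternative-key lists plus a platform-extras dict) traversed in one uniform fold.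
import Mathlib
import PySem

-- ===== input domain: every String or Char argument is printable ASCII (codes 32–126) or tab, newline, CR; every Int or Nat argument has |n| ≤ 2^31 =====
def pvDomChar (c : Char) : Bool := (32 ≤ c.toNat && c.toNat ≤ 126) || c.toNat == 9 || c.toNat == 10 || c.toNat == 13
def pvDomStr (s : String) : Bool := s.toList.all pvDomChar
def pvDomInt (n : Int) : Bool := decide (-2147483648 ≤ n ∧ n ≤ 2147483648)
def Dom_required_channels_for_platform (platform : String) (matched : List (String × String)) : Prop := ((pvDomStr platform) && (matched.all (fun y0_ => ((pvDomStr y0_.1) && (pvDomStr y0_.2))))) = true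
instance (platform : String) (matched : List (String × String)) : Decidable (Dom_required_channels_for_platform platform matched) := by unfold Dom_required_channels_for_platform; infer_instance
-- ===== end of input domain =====

-- B replaces A's branch chain by a single requirements table (alternative-key lists plus a
-- platform-extras dict) traversed once; objective: idiomatic, same cost.


-- ===== PORT A =====
def COMMON_REQUIRED : List String := ["engine_rpm", "egt"]

def required_channels_for_platform (platform : String) (matched : List (String × String)) : List String :=
  let d := PySem.Dict.mk matched
  let missing : List String :=
    COMMON_REQUIRED.foldl (fun acc req => if !d.contains req then acc ++ [req] else acc) []
  let missing :=
    if !d.contains "boost_psi" && !d.contains "map_kpa" then missing ++ ["boost_psi_or_map_kpa"]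
    else missing
  if platform == "cummins_12v_ve" || platform == "cummins_12v_ppump" then missing
  else if platform == "cummins_24v_vp44" then
    if !d.contains "fuel_pressure" then missing ++ ["fuel_pressure"] else missing
  else if platform == "cummins_5_9_common_rail" then
    let missing := if !d.contains "rail_pressure_commanded" then missing ++ ["rail_pressure_commanded"] else missing
    if !d.contains "rail_pressure_actual" then missing ++ ["rail_pressure_actual"] else missing
  else missing

-- ===== PORT B =====
def PLATFORM_EXTRAS : PySem.Dict String (List String) :=
  PySem.Dict.mk [("cummins_24v_vp44", ["fuel_pressure"]),
                 ("cummins_5_9_common_rail", ["rail_pressure_commanded", "rail_pressure_actual"])]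

def required_channels_for_platform_alt (platform : String) (matched : List (String × String)) : List String :=
  let d := PySem.Dict.mk matched
  let reqs : List (List String) :=
    [["engine_rpm"], ["egt"], ["boost_psi", "map_kpa"]]
      ++ (PLATFORM_EXTRAS.getD platform []).map (fun c => [c])
  reqs.foldl
    (fun missing alts =>
      if !(alts.any (fun k => d.contains k)) then
        missing ++ [if alts.length > 1 then "boost_psi_or_map_kpa" else alts.headD ""]
      else missing)
    []

-- ===== PRECONDITION & SPEC =====
def Spec_required_channels_for_platform (platform : String) (matched : List (String × String)) (out : List String) : Prop := out = required_channels_for_platform_alt platform matched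
instance (platform : String) (matched : List (String × String)) (out : List String) : Decidable (Spec_required_channels_for_platform platform matched out) := by unfold Spec_required_channels_for_platform; infer_instance

-- ===== CLAIM (what is proved, stated in full; the proofs are below) =====
def Claim_equal_required_channels_for_platform : Prop := ∀ (platform : String) (matched : List (String × String)), Dom_required_channels_for_platform platform matched → Spec_required_channels_for_platform platform matched (required_channels_for_platform platform matched)

-- ===== LEMMAS AND PROOFS =====

-- B's fold step on a singleton alternative list is a plain "append if missing" step.
theorem pvStepSingle (c : String → Bool) (acc : List String) (x : String) :
    (fun (missing : List String) (alts : List String) =>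
      if !(alts.any (fun k => c k)) then
        missing ++ [if alts.length > 1 then "boost_psi_or_map_kpa" else alts.headD ""]
      else missing) acc [x]
    = if !c x then acc ++ [x] else acc := by
  simp [List.any]

-- B's fold over the mapped platform extras is the elementwise "append if missing" fold.
theorem pvFoldMap (c : String → Bool) (extras acc : List String) :
    List.foldl
      (fun (missing : List String) (alts : List String) =>
        if !(alts.any (fun k => c k)) then
          missing ++ [if alts.length > 1 then "boost_psi_or_map_kpa" else alts.headD ""]
        else missing) acc (extras.map (fun x => [x]))
    = extras.foldl (fun a x => if !c x then a ++ [x] else a) acc := by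
  induction extras generalizing acc with
  | nil => rfl
  | cons x xs ih => simp only [List.map, List.foldl, pvStepSingle, ih]

-- get? on the empty literal dict (the fall-through of PLATFORM_EXTRAS for unknown platforms).
theorem pvGetMkNil {kappa nu : Type} [BEq kappa] (k : kappa) :
    (PySem.Dict.mk ([] : List (kappa × nu))).get? k = none := rfl

-- ===== VERDICT (by name: the statement is the Claim_ definition above) =====
set_option maxHeartbeats 1000000 in
theorem required_channels_for_platform_spec : Claim_equal_required_channels_for_platform := by
  intro platform matched _
  unfold Spec_required_channels_for_platform required_channels_for_platform required_channels_for_platform_alt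
  simp only [List.foldl_append, List.foldl, pvStepSingle, pvFoldMap, COMMON_REQUIRED]
  by_cases h1 : platform = "cummins_24v_vp44"
  · subst h1
    simp only [PLATFORM_EXTRAS, PySem.Dict.getD, PySem.Dict.get?_mk_cons, List.any,
      Bool.or_false, Bool.not_or, List.foldl, beq_self_eq_true, if_true, String.reduceBEq,
      if_false, Option.getD_some, reduceIte, Bool.false_eq_true, Bool.true_eq_false, List.length_cons, List.length_nil, gt_iff_lt, Nat.reduceAdd, Nat.reduceLT]
  · by_cases h2 : platform = "cummins_5_9_common_rail"
    · subst h2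
      simp only [PLATFORM_EXTRAS, PySem.Dict.getD, PySem.Dict.get?_mk_cons, List.any,
        Bool.or_false, Bool.not_or, List.foldl, beq_self_eq_true, if_true, String.reduceBEq,
        if_false, Option.getD_some, reduceIte, Bool.false_eq_true, Bool.true_eq_false, List.length_cons, List.length_nil, gt_iff_lt, Nat.reduceAdd, Nat.reduceLT]
    · simp only [PLATFORM_EXTRAS, PySem.Dict.getD, PySem.Dict.get?_mk_cons, pvGetMkNil,
        List.any, Bool.or_false, Bool.not_or, List.foldl, List.map, beq_iff_eq, h1, h2, Ne.symm h1, Ne.symm h2,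
        if_false, if_true, Option.getD_none, reduceIte, Bool.false_eq_true, Bool.true_eq_false,
        ite_self, List.length_cons, List.length_nil, gt_iff_lt, Nat.reduceAdd, Nat.reduceLT]
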